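-- pv_equiv track=rewrite | github.com/sterlingcrispin/FusionSparse | tools/map_api_coverage.py | _wrapper_target_types
-- ===== SOURCE A (Python) =====
-- from collections import Counter, defaultdict
--
-- def _wrapper_target_types(wrapper_dispatch: dict[str, list[str]]) -> dict[str, list[str]]:
--     targets: dict[str, set[str]] = defaultdict(set)
--     for raw_type, path in wrapper_dispatch.items():
--         if not raw_type.startswith("adsk."):
--             continue
--         _, class_name = path
--         targets[class_name].add(raw_type)
--     return {class_name: sorted(values) for class_name, values in sorted(targets.items())}
-- ===== SOURCE B (Python) =====
-- def _wrapper_target_types(wrapper_dispatch: dict[str, list[str]]) -> dict[str, list[str]]: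
--     pairs = [(path[1], raw_type) for raw_type, path in wrapper_dispatch.items()
--              if raw_type.startswith("adsk.")]
--     return {cls: sorted(raw for c, raw in pairs if c == cls)
--             for cls in sorted({c for c, _ in pairs})}
-- ===== Notes on version B (the rewrite author's own statement) =====
-- stated objective: simpler
-- what changed: Replaces the defaultdict-of-sets accumulation followed by per-group sorts with a flat filtered (class, raw_type) pair list and a dict comprehension that, for each sorted distinct class, collects its raw_types by a direct scan; since dict keys are unique no set dedup is needed.
import Mathlib
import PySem

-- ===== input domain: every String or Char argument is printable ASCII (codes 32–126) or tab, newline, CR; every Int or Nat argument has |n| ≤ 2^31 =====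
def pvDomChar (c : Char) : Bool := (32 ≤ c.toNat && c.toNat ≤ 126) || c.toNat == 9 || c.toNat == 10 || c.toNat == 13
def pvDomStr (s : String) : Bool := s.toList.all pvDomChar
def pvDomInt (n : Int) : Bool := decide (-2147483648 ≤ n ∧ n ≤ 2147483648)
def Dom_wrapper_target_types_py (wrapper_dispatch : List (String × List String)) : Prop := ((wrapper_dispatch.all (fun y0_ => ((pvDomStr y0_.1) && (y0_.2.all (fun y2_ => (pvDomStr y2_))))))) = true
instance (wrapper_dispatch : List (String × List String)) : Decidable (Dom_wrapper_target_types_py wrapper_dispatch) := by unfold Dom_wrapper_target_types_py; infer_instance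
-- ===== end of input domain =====

-- B replaces A's defaultdict-of-sets accumulation by a flat filtered (class, raw_type) pair list
-- and a comprehension over the sorted distinct classes (objective: simpler).

-- ===== PORT A =====
-- One iteration of A's 'for raw_type, path in wrapper_dispatch.items()' loop.
-- The '| _ => t' branch is where Python raises ValueError ('_, class_name = path'
-- with len(path) ≠ 2); those inputs are excluded by Pre_.
def pvAStep (t : PySem.Dict String (PySem.Set String)) (kv : String × List String) :
    PySem.Dict String (PySem.Set String) :=
  if PySem.Str.startswith kv.1 "adsk." then
    match kv.2 with
    | [_, class_name] => t.insert class_name (PySem.Set.add (t.getD class_name []) kv.1)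
    | _ => t
  else t

-- Python sorts targets.items() as tuples; the keys are distinct dict keys, so the
-- comparison never reaches the second component — sorting by the key is exact here.
def wrapper_target_types_py (wrapper_dispatch : List (String × List String)) :
    List (String × List String) :=
  let targets := wrapper_dispatch.foldl pvAStep PySem.Dict.empty
  (PySem.List.sorted targets.items (fun p => p.1) false).map
    (fun p => (p.1, PySem.List.sorted p.2 (fun v => v) false))

-- ===== PORT B =====
-- 'path[1]' is PySem.List.pyGet?; its 'none' (IndexError, len(path) < 2) is excluded by Pre_.
def wrapper_target_types_py_alt (wrapper_dispatch : List (String × List String)) :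
    List (String × List String) :=
  let pairs : List (String × String) := wrapper_dispatch.filterMap
    (fun kv => if PySem.Str.startswith kv.1 "adsk."
               then (PySem.List.pyGet? kv.2 1).map (fun c => (c, kv.1))
               else none)
  (PySem.List.sorted (PySem.Set.ofList (pairs.map (fun p => p.1))) (fun c => c) false).map
    (fun c => (c, PySem.List.sorted ((pairs.filter (fun p => p.1 == c)).map (fun p => p.2))
                    (fun v => v) false))

-- ===== PRECONDITION & SPEC =====
-- Pre_ requires (i) distinct raw_type keys — the list models a Python dict, whose keys are
-- unique — and (ii) every adsk-prefixed entry's path to have exactly 2 elements; on other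
-- adsk paths A raises ValueError (unpacking) and B raises IndexError for len(path) < 2.
def Pre_wrapper_target_types_py (wrapper_dispatch : List (String × List String)) : Prop :=
  (wrapper_dispatch.map Prod.fst).Nodup ∧
  ∀ kv ∈ wrapper_dispatch, PySem.Str.startswith kv.1 "adsk." = true → kv.2.length = 2
instance (wrapper_dispatch : List (String × List String)) :
    Decidable (Pre_wrapper_target_types_py wrapper_dispatch) := by
  unfold Pre_wrapper_target_types_py; infer_instance

def pvWitness_wrapper_target_types_py : (List (String × List String)) :=
  [("adsk.core.B", ["m", "C"]), ("x", ["q"]), ("adsk.a.A", ["m", "C"]), ("adsk.z", ["n", "B"])]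

def Spec_wrapper_target_types_py (wrapper_dispatch : List (String × List String))
    (out : List (String × List String)) : Prop :=
  out = wrapper_target_types_py_alt wrapper_dispatch
instance (wrapper_dispatch : List (String × List String)) (out : List (String × List String)) :
    Decidable (Spec_wrapper_target_types_py wrapper_dispatch out) := by
  unfold Spec_wrapper_target_types_py; infer_instance

-- ===== CLAIM (what is proved, stated in full; the proofs are below) =====
def Claim_equal_wrapper_target_types_py : Prop :=
  ∀ (wrapper_dispatch : List (String × List String)),
    Dom_wrapper_target_types_py wrapper_dispatch →
    Pre_wrapper_target_types_py wrapper_dispatch →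
    Spec_wrapper_target_types_py wrapper_dispatch (wrapper_target_types_py wrapper_dispatch)

-- ===== LEMMAS AND PROOFS =====

-- The (class_name, raw_type) pairs of the adsk entries with length-2 paths, in input order.
def pvGPairs (wd : List (String × List String)) : List (String × String) :=
  wd.filterMap (fun kv =>
    if PySem.Str.startswith kv.1 "adsk." then
      match kv.2 with
      | [_, c] => some (c, kv.1)
      | _ => none
    else none)

-- The grouped association list (first-occurrence class order, per-class input order).
def pvCanon (ps : List (String × String)) : List (String × PySem.Set String) :=
  (PySem.Set.ofList (ps.map (fun p => p.1))).map
    (fun c => (c, (ps.filter (fun p => p.1 == c)).map (fun p => p.2)))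

theorem pvGPairs_snd_mem {wd : List (String × List String)} {p : String × String}
    (h : p ∈ pvGPairs wd) : p.2 ∈ wd.map Prod.fst := by
  simp only [pvGPairs, List.mem_filterMap] at h
  obtain ⟨kv, hkv, hf⟩ := h
  split at hf
  · split at hf
    · cases hf
      exact List.mem_map_of_mem hkv
    · cases hf
  · cases hf

-- B's pair list equals pvGPairs under Pre_'s length condition.
theorem pvPairs_alt_eq (wd : List (String × List String))
    (hlen : ∀ kv ∈ wd, PySem.Str.startswith kv.1 "adsk." = true → kv.2.length = 2) :
    wd.filterMap
      (fun kv => if PySem.Str.startswith kv.1 "adsk."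
                 then (PySem.List.pyGet? kv.2 1).map (fun c => (c, kv.1))
                 else none) = pvGPairs wd := by
  refine List.filterMap_congr ?_
  intro kv hkv
  unfold pvGPairs at *
  cases hs : PySem.Str.startswith kv.1 "adsk." with
  | true =>
    obtain ⟨a, b, hab⟩ := List.length_eq_two.mp (hlen kv hkv hs)
    simp only [if_true, hab]
    simp [PySem.List.pyGet?, PySem.List.pyIdx?]
  | false => simp only [Bool.false_eq_true, if_false]

-- Inserting one pair into the grouped dict matches appending it to the flat pair list.
theorem pvCanon_insert (ps : List (String × String)) (c r : String)
    (d : PySem.Dict String (PySem.Set String)) (hd : d.items = pvCanon ps)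
    (hr : r ∉ ps.map (fun p => p.2)) :
    (d.insert c (PySem.Set.add (d.getD c []) r)).items = pvCanon (ps ++ [(c, r)]) := by
  have hkeys : d.keys = PySem.Set.ofList (ps.map (fun p => p.1)) := by
    simp [PySem.Dict.keys, hd, pvCanon, List.map_map, Function.comp_def]
  have hnodup : d.keys.Nodup := hkeys ▸ PySem.Set.nodup_ofList _
  by_cases hc : c ∈ PySem.Set.ofList (ps.map (fun p => p.1))
  · -- class already present: insert overwrites in place, the pair joins its group
    have hcontains : d.contains c = true := by
      rw [PySem.Dict.contains_iff_mem_keys, hkeys]; exact hc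
    have hget : d.getD c [] = (ps.filter (fun p => p.1 == c)).map (fun p => p.2) := by
      refine PySem.Dict.getD_of_mem_items _ ?_ hnodup []
      rw [hd]
      exact List.mem_map_of_mem hc
    have hrv : r ∉ (ps.filter (fun p => p.1 == c)).map (fun p => p.2) := by
      intro hmem
      obtain ⟨p, hp, hpr⟩ := List.mem_map.mp hmem
      exact hr (hpr ▸ List.mem_map_of_mem (List.mem_of_mem_filter hp))
    rw [PySem.Dict.items_insert_of_contains _ _ hcontains, hd]
    unfold pvCanon
    simp only [List.map_append, List.map_cons, List.map_nil]
    rw [PySem.Set.ofList_append_singleton]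
    have hclasses : PySem.Set.add (PySem.Set.ofList (ps.map (fun p => p.1))) c
        = PySem.Set.ofList (ps.map (fun p => p.1)) := by
      simp [PySem.Set.add, PySem.Set.contains, hc]
    rw [hclasses, List.map_map]
    refine List.map_congr_left ?_
    intro c' hc'
    by_cases hcc : c' = c
    · subst hcc
      simp [hget, List.filter_append]
      simp [PySem.Set.add, PySem.Set.contains, hrv]
    · have hbeq : (c == c') = false := beq_eq_false_iff_ne.mpr (fun h => hcc h.symm)
      simp [List.filter_append, hbeq, hcc]
  · -- new class: insert appends, the pair starts a new group
    have hcontains : d.contains c = false := by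
      rw [Bool.eq_false_iff, Ne, PySem.Dict.contains_iff_mem_keys, hkeys]
      exact hc
    have hget : d.getD c [] = [] := PySem.Dict.getD_of_not_contains _ _ hcontains
    have hadd : PySem.Set.add (d.getD c []) r = [r] := by rw [hget]; rfl
    have hps : c ∉ ps.map (fun p => p.1) := fun h => hc ((PySem.Set.mem_ofList _ _).mpr h)
    have hfilter : ps.filter (fun p => p.1 == c) = [] := by
      rw [List.filter_eq_nil_iff]
      intro p hp
      simp only [beq_iff_eq]
      exact fun h => hps (h ▸ List.mem_map_of_mem hp)
    rw [PySem.Dict.items_insert_of_not_contains _ _ hcontains, hd, hadd]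
    unfold pvCanon
    simp only [List.map_append, List.map_cons, List.map_nil]
    rw [PySem.Set.ofList_append_singleton]
    have hclasses : PySem.Set.add (PySem.Set.ofList (ps.map (fun p => p.1))) c
        = PySem.Set.ofList (ps.map (fun p => p.1)) ++ [c] := by
      simp [PySem.Set.add, PySem.Set.contains, hc]
    rw [hclasses, List.map_append]
    congr 1
    · refine List.map_congr_left ?_
      intro c' hc'
      have hcc : c' ≠ c := fun h => hc (h ▸ hc')
      have hbeq : (c == c') = false := beq_eq_false_iff_ne.mpr (fun h => hcc h.symm)
      simp [List.filter_append, hbeq]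
    · simp [List.filter_append, hfilter]

-- A's accumulation loop builds exactly the grouping of pvGPairs.
theorem pvAFold_items (wd : List (String × List String))
    (hnd : (wd.map Prod.fst).Nodup) :
    (wd.foldl pvAStep PySem.Dict.empty).items = pvCanon (pvGPairs wd) := by
  induction wd using List.reverseRecOn with
  | nil => rfl
  | append_singleton l kv ih =>
    rw [List.map_append, List.nodup_append] at hnd
    obtain ⟨hnd1, hnd2, hdisj⟩ := hnd
    have hfresh : kv.1 ∉ l.map Prod.fst := fun h => by
      simpa using hdisj _ h kv.1 (by simp)
    have hgp : pvGPairs (l ++ [kv]) = pvGPairs l ++ pvGPairs [kv] := by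
      unfold pvGPairs; rw [List.filterMap_append]
    rw [List.foldl_append, List.foldl_cons, List.foldl_nil]
    set t := l.foldl pvAStep PySem.Dict.empty with ht
    rcases kv with ⟨rt, path⟩
    by_cases hs : PySem.Str.startswith rt "adsk." = true
    · rcases path with _ | ⟨a, _ | ⟨b, _ | ⟨x, rest⟩⟩⟩
      · rw [show pvAStep t (rt, []) = t from by unfold pvAStep; rw [if_pos hs], hgp,
            show pvGPairs [(rt, [])] = [] from by
              simp only [pvGPairs, List.filterMap_cons, List.filterMap_nil, if_pos hs],
            List.append_nil]
        exact ih hnd1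
      · rw [show pvAStep t (rt, [a]) = t from by unfold pvAStep; rw [if_pos hs], hgp,
            show pvGPairs [(rt, [a])] = [] from by
              simp only [pvGPairs, List.filterMap_cons, List.filterMap_nil, if_pos hs],
            List.append_nil]
        exact ih hnd1
      · have hr : rt ∉ (pvGPairs l).map (fun p => p.2) := by
          intro hmem
          obtain ⟨p, hp, hpr⟩ := List.mem_map.mp hmem
          exact hfresh (hpr ▸ pvGPairs_snd_mem hp)
        rw [show pvAStep t (rt, [a, b]) = t.insert b (PySem.Set.add (t.getD b []) rt) from by
              unfold pvAStep; rw [if_pos hs],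
            pvCanon_insert (pvGPairs l) b rt t (ih hnd1) hr, hgp]
        congr 1
        simp only [pvGPairs, List.filterMap_cons, List.filterMap_nil, if_pos hs]
      · rw [show pvAStep t (rt, a :: b :: x :: rest) = t from by unfold pvAStep; rw [if_pos hs],
            hgp,
            show pvGPairs [(rt, a :: b :: x :: rest)] = [] from by
              simp only [pvGPairs, List.filterMap_cons, List.filterMap_nil, if_pos hs],
            List.append_nil]
        exact ih hnd1
    · rw [show pvAStep t (rt, path) = t from by unfold pvAStep; rw [if_neg hs], hgp,
          show pvGPairs [(rt, path)] = [] from by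
            simp only [pvGPairs, List.filterMap_cons, List.filterMap_nil, if_neg hs],
          List.append_nil]
      exact ih hnd1

-- Sorting the grouped items by key = mapping over the sorted distinct classes.
theorem pvSorted_canon (ps : List (String × String)) :
    (PySem.List.sorted (pvCanon ps) (fun p => p.1) false).map
      (fun p => (p.1, PySem.List.sorted p.2 (fun v => v) false)) =
    (PySem.List.sorted (PySem.Set.ofList (ps.map (fun p => p.1))) (fun c => c) false).map
      (fun c => (c, PySem.List.sorted ((ps.filter (fun p => p.1 == c)).map (fun p => p.2))
                      (fun v => v) false)) := by
  have hstep : PySem.List.sorted (pvCanon ps) (fun p => p.1) false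
      = (PySem.List.sorted (PySem.Set.ofList (ps.map (fun p => p.1))) (fun c => c) false).map
          (fun c => (c, (ps.filter (fun p => p.1 == c)).map (fun p => p.2))) := by
    apply PySem.List.sorted_eq_of_perm_of_pairwise_lt
    · exact (PySem.List.sorted_perm _ _ _).map _
    · rw [List.pairwise_map]
      exact PySem.List.sorted_ofList_pairwise_lt _
  rw [hstep, List.map_map]
  rfl

-- ===== VERDICT (by name: the statement is the Claim_ definition above) =====
theorem wrapper_target_types_py_spec : Claim_equal_wrapper_target_types_py := by
  intro wd _ hpre
  unfold Spec_wrapper_target_types_py wrapper_target_types_py wrapper_target_types_py_alt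
  dsimp only
  rw [pvPairs_alt_eq wd hpre.2, pvAFold_items wd hpre.1, pvSorted_canon]
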